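-- pv_equiv track=rewrite | github.com/phbortolotti/udacity-chicago-bikeshare | chicago_bikeshare_br.py | count_column_value
-- ===== SOURCE A (Python) =====
-- def count_column_value(column_list):
--     """
--     Agrupa e soma os valores de uma coluna de uma lista.
--     Argumentos:
--         column_list: list
--     Retorna:
--         Dicionário com o valor da colna e a soma.
--     """
--     data = {}
--     for column in column_list:
--         if column:
--             try:
--                 data[column] += 1
--             except KeyError:
--                 data[column] = 1
--     return data
-- ===== SOURCE B (Python) =====
-- def count_column_value(column_list):
--     """
--     Agrupa e soma os valores de uma coluna de uma lista.
--     Argumentos: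
--         column_list: list
--     Retorna:
--         Dicionário com o valor da colna e a soma.
--     """
--     truthy = [v for v in column_list if v]
--     order = list(dict.fromkeys(truthy))
--     pos = {v: i for i, v in enumerate(order)}
--     counts = [0] * len(order)
--     for v in truthy:
--         counts[pos[v]] += 1
--     return dict(zip(order, counts))
-- ===== Notes on version B (the rewrite author's own statement) =====
-- stated objective: alternative
-- what changed: Replaces A's single accumulating dict pass with try/except increments by a dedup-first strategy: filter the truthy values, fix the key order with dict.fromkeys, then count into a positional integer array indexed via a precomputed position map and zip keys with counts.
import Mathlib
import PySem

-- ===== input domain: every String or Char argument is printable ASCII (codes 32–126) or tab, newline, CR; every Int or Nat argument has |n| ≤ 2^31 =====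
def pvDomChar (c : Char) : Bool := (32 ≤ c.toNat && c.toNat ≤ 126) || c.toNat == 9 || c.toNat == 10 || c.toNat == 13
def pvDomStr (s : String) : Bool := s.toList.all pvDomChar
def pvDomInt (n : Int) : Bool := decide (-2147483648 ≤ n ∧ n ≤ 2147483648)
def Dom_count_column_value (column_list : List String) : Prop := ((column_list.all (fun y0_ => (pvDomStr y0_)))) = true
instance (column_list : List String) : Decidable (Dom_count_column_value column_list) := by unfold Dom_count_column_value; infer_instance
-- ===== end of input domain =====

-- B builds the result dedup-first with a positional count array instead of A's try/except dict pass; same return value.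
-- ===== PORT A =====
-- data = {}; for column in column_list: if column: try data[column] += 1 except KeyError: data[column] = 1
def count_column_value (column_list : List String) : List (String × Int) :=
  (column_list.foldl
    (fun data column =>
      if column ≠ "" then
        match data.get? column with          -- try: data[column] += 1
        | some n => data.insert column (n + 1)
        | none   => data.insert column 1     -- except KeyError: data[column] = 1
      else data)
    PySem.Dict.empty).items

-- ===== PORT B =====
def count_column_value_alt (column_list : List String) : List (String × Int) :=
  let truthy := column_list.filter (fun v => v ≠ "")           -- [v for v in column_list if v]
  let order := PySem.List.dedup truthy                          -- list(dict.fromkeys(truthy))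
  let pos := (PySem.List.enumerate order).foldl                 -- {v: i for i, v in enumerate(order)}
      (fun d (p : Int × String) => d.insert p.2 p.1) PySem.Dict.empty
  let counts := truthy.foldl                                    -- for v in truthy: counts[pos[v]] += 1
      (fun cs v =>
        PySem.List.pySetD cs (pos.getD v 0)                     -- pos[v]: KeyError impossible (v ∈ order), so getD is exact
          (PySem.List.pyGetD cs (pos.getD v 0) 0 + 1))
      (List.replicate order.length (0 : Int))                   -- [0] * len(order)
  order.zip counts                                              -- dict(zip(order, counts)): keys of order are distinct

-- ===== PRECONDITION & SPEC =====
def Spec_count_column_value (column_list : List String) (out : List (String × Int)) : Prop := out = count_column_value_alt column_list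
instance (column_list : List String) (out : List (String × Int)) : Decidable (Spec_count_column_value column_list out) := by unfold Spec_count_column_value; infer_instance

-- ===== CLAIM (what is proved, stated in full; the proofs are below) =====
def Claim_equal_count_column_value : Prop := ∀ (column_list : List String), Dom_count_column_value column_list → Spec_count_column_value column_list (count_column_value column_list)

-- ===== LEMMAS AND PROOFS =====

-- A's try/except loop body is the 'insert x (getD x 0 + 1)' counter step.
theorem step_eq (data : PySem.Dict String Int) (c : String) :
    (match data.get? c with
      | some n => data.insert c (n + 1)
      | none   => data.insert c 1) = data.insert c (data.getD c 0 + 1) := by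
  cases h : data.get? c <;> simp [PySem.Dict.getD, h]

-- A returns the distinct truthy values in first-occurrence order, each with its count.
theorem A_char (xs : List String) :
    count_column_value xs =
      (PySem.List.dedup (xs.filter (fun v => v ≠ ""))).map
        (fun v => (v, ((xs.filter (fun v => v ≠ "")).count v : Int))) := by
  unfold count_column_value
  have h := PySem.List.foldl_congr_mem
      (f := fun (d : PySem.Dict String Int) c =>
        if c ≠ "" then
          match d.get? c with
          | some n => d.insert c (n + 1)
          | none   => d.insert c 1
        else d)
      (g := fun (d : PySem.Dict String Int) c =>
        if c ≠ "" then d.insert c (d.getD c 0 + 1) else d)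
      (l := xs) (init := PySem.Dict.empty)
      (by intro d c _; by_cases hc : c = "" <;> simp [hc, step_eq])
  rw [h, PySem.List.foldl_ite_eq_foldl_filter,
    PySem.Dict.foldl_insert_getD_add_one_eq_counter,
    PySem.Dict.items_counter]
  simp

-- B's position map sends each element of a duplicate-free list to its index.
theorem pos_get? (order : List String) (hnd : order.Nodup) (d : PySem.Dict String Int)
    (k : Int) (v : String) :
    ((PySem.List.enumerate order k).foldl
        (fun d (p : Int × String) => d.insert p.2 p.1) d).get? v =
      if v ∈ order then some (k + (order.idxOf v : Int)) else d.get? v := by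
  induction order generalizing d k with
  | nil => simp [PySem.List.enumerate]
  | cons o os ih =>
    simp only [List.nodup_cons] at hnd
    rw [show PySem.List.enumerate (o :: os) k = (k, o) :: PySem.List.enumerate os (k + 1) by
      simp [PySem.List.enumerate]]
    rw [List.foldl_cons, ih hnd.2]
    by_cases hv : v = o
    · subst hv
      simp [hnd.1, PySem.Dict.get?_insert_self]
    · by_cases hmem : v ∈ os
      · simp [hmem, List.idxOf_cons,
          (beq_eq_false_iff_ne (a := o) (b := v)).mpr (Ne.symm hv)]
        ring
      · simp [hmem, hv, PySem.Dict.get?_insert_of_ne _ _ hv]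

-- B's counting loop: processing ts adds ts.count order[j] to slot j.
theorem counts_loop (order : List String) (hnd : order.Nodup)
    (pos : PySem.Dict String Int)
    (hpos : ∀ v ∈ order, pos.getD v 0 = (order.idxOf v : Int))
    (ts : List String) (hts : ∀ v ∈ ts, v ∈ order)
    (cs : List Int) (hlen : cs.length = order.length) :
    ts.foldl
        (fun cs v =>
          PySem.List.pySetD cs (pos.getD v 0)
            (PySem.List.pyGetD cs (pos.getD v 0) 0 + 1)) cs =
      List.ofFn (n := order.length)
        (fun j => PySem.List.pyGetD cs (j : Int) 0 + (ts.count order[j] : Int)) := by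
  induction ts generalizing cs with
  | nil =>
    apply List.ext_getElem
    · simp [hlen]
    · intro j h1 h2
      simp only [List.getElem_ofFn]
      rw [PySem.List.pyGetD_eq_getElem cs 0 (by positivity) (by simpa [hlen] using h2)]
      simp
  | cons v ts ih =>
    have hvmem : v ∈ order := hts v (List.mem_cons_self)
    have hidx : order.idxOf v < order.length := List.idxOf_lt_length_of_mem hvmem
    rw [List.foldl_cons, hpos v hvmem]
    rw [ih (fun w hw => hts w (List.mem_cons_of_mem _ hw)) _
        (by simp [hlen])]
    apply List.ext_getElem
    · simp
    · intro j h1 h2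
      simp only [List.getElem_ofFn]
      rw [show ((j : Nat) : Int) = ((j : Nat) : Int) from rfl,
        PySem.List.pyGetD_pySetD_natCast cs (order.idxOf v) j _ 0 (by omega)]
      by_cases hj : j = order.idxOf v
      · subst hj
        have : order[order.idxOf v] = v := List.getElem_idxOf hidx
        simp [this]
        ring
      · have : order[j]'(by simpa using h2) ≠ v := by
          intro hEq
          exact hj (by rw [← hEq] at hidx ⊢; exact (List.Nodup.idxOf_getElem hnd _ _).symm ▸ rfl)
        simp [hj, Ne.symm this]

-- ===== VERDICT (by name: the statement is the Claim_ definition above) =====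
theorem count_column_value_spec : Claim_equal_count_column_value := by
  intro xs _
  unfold Spec_count_column_value
  simp only [count_column_value_alt]
  rw [A_char]
  set truthy := xs.filter (fun v => v ≠ "") with htr
  set order := PySem.List.dedup truthy with hor
  have hnd : order.Nodup := PySem.List.nodup_dedup truthy
  have hpos : ∀ v ∈ order,
      ((PySem.List.enumerate order).foldl
        (fun d (p : Int × String) => d.insert p.2 p.1) PySem.Dict.empty).getD v 0 =
        (order.idxOf v : Int) := by
    intro v hv
    simp [PySem.Dict.getD, pos_get? order hnd PySem.Dict.empty 0 v, hv]
  rw [counts_loop order hnd _ hpos truthy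
      (fun v hv => by simpa [hor] using (PySem.List.mem_dedup (x := v) (xs := truthy)).mpr hv)
      _ (by simp)]
  apply List.ext_getElem
  · simp
  · intro j h1 h2
    simp only [List.getElem_zip, List.getElem_ofFn, List.getElem_map]
    congr 1
    rw [PySem.List.pyGetD_eq_getElem _ 0 (by positivity) (by simpa using h2)]
    simp
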